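-- pv_equiv track=rewrite | github.com/YifanZou1210/Career-Twins-Finder | src/data_processor.py | _extract_tech_experience_level
-- ===== SOURCE A (Python) =====
-- def _extract_tech_experience_level(title, exp_str, description):
--     """科技行业经验级别判断"""
--     text = f"{title} {exp_str} {description[:500]}".lower()
--
--     # 科技行业的级别判断
--     if any(word in text for word in ['intern', 'entry', 'junior', 'associate']):
--         return 1  # Junior
--     elif any(word in text for word in ['mid-level', 'mid level', '2-5 years', '3-5 years']):
--         return 2  # Mid
--     elif any(word in text for word in ['senior', 'lead', 'sr.', '5+ years', '7+ years']):
--         return 3  # Senior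
--     elif any(word in text for word in ['staff', 'principal', 'architect']):
--         return 4  # Staff/Principal
--     elif any(word in text for word in ['manager', 'director', 'vp', 'cto']):
--         return 5  # Management
--     else:
--         # 默认根据年限判断
--         if '0-2' in text or '1-3' in text:
--             return 1
--         elif '10+' in text or '15+' in text:
--             return 4
--         return 2
-- ===== SOURCE B (Python) =====
-- _KEYWORD_RANK_LEVEL = {
--     'intern': (0, 1), 'entry': (0, 1), 'junior': (0, 1), 'associate': (0, 1),
--     'mid-level': (1, 2), 'mid level': (1, 2), '2-5 years': (1, 2), '3-5 years': (1, 2),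
--     'senior': (2, 3), 'lead': (2, 3), 'sr.': (2, 3), '5+ years': (2, 3), '7+ years': (2, 3),
--     'staff': (3, 4), 'principal': (3, 4), 'architect': (3, 4),
--     'manager': (4, 5), 'director': (4, 5), 'vp': (4, 5), 'cto': (4, 5),
--     '0-2': (5, 1), '1-3': (5, 1),
--     '10+': (6, 4), '15+': (6, 4),
-- }
--
--
-- def _extract_tech_experience_level(title, exp_str, description):
--     text = f"{title} {exp_str} {description[:500]}".lower()
--     # Collect every matching keyword and take the highest-priority (lowest rank) one.
--     best = min((rl for kw, rl in _KEYWORD_RANK_LEVEL.items() if kw in text),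
--                default=(7, 2))
--     return best[1]
-- ===== Notes on version B (the rewrite author's own statement) =====
-- stated objective: alternative
-- what changed: Instead of an early-exit if/elif cascade over keyword groups, B checks every keyword of one flat keyword->(priority,level) map against the text and returns the level of the minimum-priority match via min(...) with default (7,2); correctness holds because the first matching group in A is exactly the minimum rank among all matches.
import Mathlib
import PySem

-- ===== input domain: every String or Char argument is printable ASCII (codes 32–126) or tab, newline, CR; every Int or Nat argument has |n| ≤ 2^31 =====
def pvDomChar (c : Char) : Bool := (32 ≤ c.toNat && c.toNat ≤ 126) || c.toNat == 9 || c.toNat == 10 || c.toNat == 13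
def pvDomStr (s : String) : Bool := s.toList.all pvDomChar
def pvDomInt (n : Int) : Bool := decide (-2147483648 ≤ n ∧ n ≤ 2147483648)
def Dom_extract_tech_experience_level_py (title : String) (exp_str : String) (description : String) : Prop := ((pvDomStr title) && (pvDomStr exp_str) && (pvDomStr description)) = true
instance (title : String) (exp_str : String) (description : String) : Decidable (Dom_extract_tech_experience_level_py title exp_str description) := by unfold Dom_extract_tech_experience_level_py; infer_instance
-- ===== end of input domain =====

-- B replaces A's early-exit if/elif keyword cascade with one flat keyword→(rank, level) table:
-- every keyword is tested and the level of the minimum-rank match is returned (default (7, 2)) —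
-- an aggregate-min formulation instead of a priority cascade (alternative, same cost).


-- ===== PORT A =====
def extract_tech_experience_level_py (title : String) (exp_str : String) (description : String) : Int :=
  let text := PySem.Str.lower (title ++ " " ++ exp_str ++ " " ++ PySem.Str.slice description none (some 500))
  if ["intern", "entry", "junior", "associate"].any (fun w => PySem.Str.isIn w text) then 1
  else if ["mid-level", "mid level", "2-5 years", "3-5 years"].any (fun w => PySem.Str.isIn w text) then 2
  else if ["senior", "lead", "sr.", "5+ years", "7+ years"].any (fun w => PySem.Str.isIn w text) then 3
  else if ["staff", "principal", "architect"].any (fun w => PySem.Str.isIn w text) then 4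
  else if ["manager", "director", "vp", "cto"].any (fun w => PySem.Str.isIn w text) then 5
  else if PySem.Str.isIn "0-2" text || PySem.Str.isIn "1-3" text then 1
  else if PySem.Str.isIn "10+" text || PySem.Str.isIn "15+" text then 4
  else 2

-- ===== PORT B =====
-- the flat keyword → (rank, level) map of Source B, in insertion order
def pvKeywordRankLevel : List (String × Int × Int) :=
  [ ("intern", 0, 1), ("entry", 0, 1), ("junior", 0, 1), ("associate", 0, 1),
    ("mid-level", 1, 2), ("mid level", 1, 2), ("2-5 years", 1, 2), ("3-5 years", 1, 2),
    ("senior", 2, 3), ("lead", 2, 3), ("sr.", 2, 3), ("5+ years", 2, 3), ("7+ years", 2, 3),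
    ("staff", 3, 4), ("principal", 3, 4), ("architect", 3, 4),
    ("manager", 4, 5), ("director", 4, 5), ("vp", 4, 5), ("cto", 4, 5),
    ("0-2", 5, 1), ("1-3", 5, 1),
    ("10+", 6, 4), ("15+", 6, 4) ]

-- Python tuple min step: keep the candidate only when it is lexicographically smaller
def pvMinStep (acc cand : Int × Int) : Int × Int :=
  if cand.1 < acc.1 ∨ (cand.1 = acc.1 ∧ cand.2 < acc.2) then cand else acc

def extract_tech_experience_level_py_alt (title : String) (exp_str : String) (description : String) : Int :=
  let text := PySem.Str.lower (title ++ " " ++ exp_str ++ " " ++ PySem.Str.slice description none (some 500))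
  -- min((rl for kw, rl in table if kw in text), default=(7, 2))
  let best := (pvKeywordRankLevel.filterMap
      (fun p => if PySem.Str.isIn p.1 text then some p.2 else none)).foldl pvMinStep (7, 2)
  best.2

-- ===== PRECONDITION & SPEC =====
def Spec_extract_tech_experience_level_py (title : String) (exp_str : String) (description : String) (out : Int) : Prop := out = extract_tech_experience_level_py_alt title exp_str description
instance (title : String) (exp_str : String) (description : String) (out : Int) : Decidable (Spec_extract_tech_experience_level_py title exp_str description out) := by unfold Spec_extract_tech_experience_level_py; infer_instance

-- ===== CLAIM (what is proved, stated in full; the proofs are below) =====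
def Claim_equal_extract_tech_experience_level_py : Prop := ∀ (title : String) (exp_str : String) (description : String), Dom_extract_tech_experience_level_py title exp_str description → Spec_extract_tech_experience_level_py title exp_str description (extract_tech_experience_level_py title exp_str description)

-- ===== LEMMAS AND PROOFS =====

-- fold over the matching elements = fold over all elements, guarded (generic in the match test c)
theorem pv_foldl_filterMap (c : String → Bool) (l : List (String × Int × Int)) (a : Int × Int) :
    ((l.filterMap (fun p => if c p.1 then some p.2 else none)).foldl pvMinStep a)
      = l.foldl (fun acc p => if c p.1 then pvMinStep acc p.2 else acc) a := by
  induction l generalizing a with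
  | nil => rfl
  | cons p rest ih =>
      simp only [List.filterMap_cons, List.foldl_cons]
      by_cases h : c p.1 = true
      · simp only [h]
        exact ih _
      · simp only [h]
        simp only [Bool.false_eq_true, if_false]
        exact ih _

theorem pvMinStep_idem (a v : Int × Int) : pvMinStep (pvMinStep a v) v = pvMinStep a v := by
  unfold pvMinStep
  split_ifs <;> simp_all

-- a group of keywords all carrying the same (rank, level) contributes one conditional min-step
theorem pv_foldl_group (c : String → Bool) (v : Int × Int) (ks : List String) (a : Int × Int) :
    ((ks.map (fun k => (k, v))).foldl
        (fun acc p => if c p.1 then pvMinStep acc p.2 else acc) a)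
      = if ks.any c then pvMinStep a v else a := by
  induction ks generalizing a with
  | nil => rfl
  | cons k rest ih =>
      simp only [List.map_cons, List.foldl_cons, List.any_cons]
      by_cases h : c k = true
      · simp only [h, Bool.true_or, ih]
        by_cases h2 : rest.any c = true <;> simp [h2, pvMinStep_idem]
      · simp only [h, Bool.false_eq_true, if_false, Bool.false_or, ih]

-- the flat table is the concatenation of the seven constant-valued groups
theorem pv_table_eq :
    pvKeywordRankLevel
      = (["intern", "entry", "junior", "associate"].map (fun k => (k, ((0 : Int), (1 : Int)))))
        ++ (["mid-level", "mid level", "2-5 years", "3-5 years"].map (fun k => (k, ((1 : Int), (2 : Int)))))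
        ++ (["senior", "lead", "sr.", "5+ years", "7+ years"].map (fun k => (k, ((2 : Int), (3 : Int)))))
        ++ (["staff", "principal", "architect"].map (fun k => (k, ((3 : Int), (4 : Int)))))
        ++ (["manager", "director", "vp", "cto"].map (fun k => (k, ((4 : Int), (5 : Int)))))
        ++ (["0-2", "1-3"].map (fun k => (k, ((5 : Int), (1 : Int)))))
        ++ (["10+", "15+"].map (fun k => (k, ((6 : Int), (4 : Int))))) := by
  rfl

-- ===== VERDICT (by name: the statement is the Claim_ definition above) =====
theorem extract_tech_experience_level_py_spec : Claim_equal_extract_tech_experience_level_py := by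
  intro title exp_str description _
  unfold Spec_extract_tech_experience_level_py extract_tech_experience_level_py
    extract_tech_experience_level_py_alt
  generalize PySem.Str.lower (title ++ " " ++ exp_str ++ " " ++ PySem.Str.slice description none (some 500)) = text
  rw [pv_table_eq]
  simp only [pv_foldl_filterMap (fun w => PySem.Str.isIn w text), List.foldl_append,
    pv_foldl_group (fun w => PySem.Str.isIn w text)]
  generalize ["intern", "entry", "junior", "associate"].any (fun w => PySem.Str.isIn w text) = g1
  generalize ["mid-level", "mid level", "2-5 years", "3-5 years"].any (fun w => PySem.Str.isIn w text) = g2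
  generalize ["senior", "lead", "sr.", "5+ years", "7+ years"].any (fun w => PySem.Str.isIn w text) = g3
  generalize ["staff", "principal", "architect"].any (fun w => PySem.Str.isIn w text) = g4
  generalize ["manager", "director", "vp", "cto"].any (fun w => PySem.Str.isIn w text) = g5
  simp only [List.any_cons, List.any_nil, Bool.or_false]
  generalize (PySem.Str.isIn "0-2" text || PySem.Str.isIn "1-3" text) = g6
  generalize (PySem.Str.isIn "10+" text || PySem.Str.isIn "15+" text) = g7
  revert g1 g2 g3 g4 g5 g6 g7
  decide
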